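-- pv_equiv track=rewrite | github.com/Yuncodeinside/Python_CodingTest | [BJ]/[이코테]/문자열 교환.py | solution
-- ===== SOURCE A (Python) =====
-- def solution(s):
--
--     # a의 개수를 계산하여 슬라이딩 윈도우의 크기로 사용함
--     a_count = s.count('a')
--
--     extend_s = s+s # 원형 연결
--
--     #첫번째 윈도우에서 b의 개수를 세어 초기화
--     b_count = sum(1 for i in range(a_count) if extend_s[i] == 'b')
--     min_swap = b_count
--
--     for i in range(a_count, len(extend_s)):
--         if extend_s[i-a_count] == 'b':
--             b_count -= 1
--         if extend_s[i] == 'b':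
--             b_count += 1
--         min_swap = min(min_swap, b_count)
--
--     return min_swap
-- ===== SOURCE B (Python) =====
-- def solution(s):
--     # Prefix-sum re-implementation: pre[j] = number of 'b' in (s+s)[:j];
--     # the b-count of the window starting at j is pre[j+k]-pre[j].
--     k = s.count('a')
--     ext = s + s
--     pre = [0]
--     t = 0
--     for c in ext:
--         if c == 'b':
--             t += 1
--         pre.append(t)
--     best = pre[k]
--     for j in range(1, len(ext) - k + 1):
--         best = min(best, pre[j + k] - pre[j])
--     return best
-- ===== Notes on version B (the rewrite author's own statement) =====
-- stated objective: alternative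
-- what changed: Replaces the incrementally maintained sliding-window counter (subtract the char leaving, add the char entering) by a prefix-sum table over the doubled string, scoring each window independently as pre[j+k]-pre[j].
import Mathlib
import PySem

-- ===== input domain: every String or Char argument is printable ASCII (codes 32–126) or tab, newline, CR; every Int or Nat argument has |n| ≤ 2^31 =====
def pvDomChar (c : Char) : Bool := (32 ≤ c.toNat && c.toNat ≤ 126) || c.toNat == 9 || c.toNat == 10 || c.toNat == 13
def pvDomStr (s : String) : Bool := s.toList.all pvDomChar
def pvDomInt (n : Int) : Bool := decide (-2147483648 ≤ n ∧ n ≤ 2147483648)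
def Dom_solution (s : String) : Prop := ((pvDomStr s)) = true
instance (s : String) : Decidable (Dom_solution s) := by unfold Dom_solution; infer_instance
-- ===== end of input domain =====

-- B replaces A's incrementally maintained sliding-window counter by a prefix-sum table
-- over the doubled string, scoring each window independently (alternative decomposition, same cost).

-- ===== PORT A =====
-- A: window of size a_count slides over s+s; the b-count is maintained incrementally
-- (subtract the character leaving, add the character entering), tracking the running minimum.
def solution (s : String) : Int :=
  let aCount := PySem.Str.count s "a"
  let extS := s.toList ++ s.toList
  let bCount : Int := ((List.range aCount).countP (fun i => extS.getD i ' ' == 'b') : Nat)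
  let r := (List.range' aCount (extS.length - aCount)).foldl
    (fun (st : Int × Int) i =>
      let b := st.1
      let b := if extS.getD (i - aCount) ' ' == 'b' then b - 1 else b
      let b := if extS.getD i ' ' == 'b' then b + 1 else b
      (b, min st.2 b)) (bCount, bCount)
  r.2

-- ===== PORT B =====
-- B: prefix sums pre[j] = #'b' in (s+s)[:j]; the window starting at j is scored as pre[j+k]-pre[j].
def solution_alt (s : String) : Int :=
  let k := PySem.Str.count s "a"
  let extS := s.toList ++ s.toList
  let pre := (extS.foldl (fun (st : List Int × Int) c =>
      let t := if c == 'b' then st.2 + 1 else st.2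
      (st.1 ++ [t], t)) ([(0 : Int)], 0)).1
  let best := pre.getD k 0
  (List.range' 1 (extS.length - k)).foldl
    (fun b j => min b (pre.getD (j + k) 0 - pre.getD j 0)) best

-- ===== PRECONDITION & SPEC =====
def Spec_solution (s : String) (out : Int) : Prop := out = solution_alt s
instance (s : String) (out : Int) : Decidable (Spec_solution s out) := by unfold Spec_solution; infer_instance

-- ===== CLAIM (what is proved, stated in full; the proofs are below) =====
def Claim_equal_solution : Prop := ∀ (s : String), Dom_solution s → Spec_solution s (solution s)

-- ===== LEMMAS AND PROOFS =====

-- number of 'b' among the first j characters of l, as an Int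
def cntB (l : List Char) (j : Nat) : Int := ((l.take j).countP (fun c => c == 'b') : Nat)

-- b-count of the window of size k starting at position j
def winB (l : List Char) (k j : Nat) : Int := cntB l (j + k) - cntB l j

lemma go_count_singleton (c : Char) : ∀ (fuel : Nat) (l : List Char) (acc : Nat),
    l.length ≤ fuel → PySem.Chars.count.go [c] fuel l acc = acc + l.count c := by
  intro fuel
  induction fuel with
  | zero =>
      intro l acc h
      have : l = [] := List.eq_nil_of_length_eq_zero (Nat.le_zero.mp h)
      subst this
      simp [PySem.Chars.count.go]
  | succ n ih =>
      intro l acc h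
      cases l with
      | nil => simp [PySem.Chars.count.go]
      | cons x t =>
          rw [PySem.Chars.count.go]
          by_cases hc : c = x
          · subst hc
            simp [List.isPrefixOf, ih t (acc + 1) (by simpa using h)]
            omega
          · simp [List.isPrefixOf, hc, ih t acc (by simpa using h), Ne.symm hc]

-- s.count('a') never exceeds len(s)
lemma str_count_le (s : String) : PySem.Str.count s "a" ≤ s.toList.length := by
  rw [PySem.Str.count_eq]
  show PySem.Chars.count s.toList ['a'] ≤ _
  rw [PySem.Chars.count]
  simp only [List.isEmpty_cons]
  rw [go_count_singleton 'a' _ _ _ le_rfl]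
  simpa using List.count_le_length

lemma cntB_succ (l : List Char) (j : Nat) (hj : j < l.length) :
    cntB l (j + 1) = cntB l j + (if l.getD j ' ' == 'b' then (1 : Int) else 0) := by
  unfold cntB
  have h : List.take (j + 1) l = List.take j l ++ [l[j]] := by
    rw [List.take_add_one, List.getElem?_eq_getElem hj] ; rfl
  rw [h, List.countP_append, List.getD_eq_getElem l ' ' hj]
  by_cases hb : l[j] = 'b' <;> simp [hb]

lemma cntB_cons (c : Char) (l : List Char) (j : Nat) :
    cntB (c :: l) (j + 1) = (if c == 'b' then 1 else 0) + cntB l j := by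
  unfold cntB
  simp [List.countP_cons]
  by_cases hb : c = 'b' <;> simp [hb] <;> push_cast <;> ring

-- A's initial window count equals cntB
lemma bcount_init (l : List Char) (m : Nat) (hm : m ≤ l.length) :
    (((List.range m).countP (fun i => l.getD i ' ' == 'b') : Nat) : Int) = cntB l m := by
  induction m with
  | zero => simp [cntB]
  | succ j ih =>
      rw [List.range_succ, List.countP_append, cntB_succ l j (by omega)]
      rw [← ih (by omega)]
      by_cases hb : l.getD j ' ' = 'b' <;> simp [hb]

-- B's accumulation loop builds exactly the prefix-sum table
lemma pre_fold (l : List Char) : ∀ (acc : List Int) (t : Int),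
    l.foldl (fun (st : List Int × Int) c =>
      let t := if c == 'b' then st.2 + 1 else st.2
      (st.1 ++ [t], t)) (acc, t)
    = (acc ++ (List.range l.length).map (fun j => t + cntB l (j + 1)), t + cntB l l.length) := by
  induction l with
  | nil => intro acc t; simp [cntB]
  | cons c tl ih =>
      intro acc t
      simp only [List.foldl_cons]
      rw [ih]
      have ht : (if c == 'b' then t + 1 else t) = t + (if c == 'b' then 1 else 0) := by
        split_ifs <;> simp
      have h0 : cntB tl 0 = 0 := by simp [cntB]
      rw [ht, List.length_cons, List.range_succ_eq_map, List.map_cons, List.map_map]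
      refine Prod.ext ?_ ?_
      · show acc ++ [t + _] ++ _ = _
        rw [List.append_assoc, List.singleton_append]
        congr 1
        congr 1
        · rw [cntB_cons]; simp [h0]
        · apply List.map_congr_left
          intro j hj
          simp only [Function.comp_apply, Nat.succ_eq_add_one, cntB_cons]
          ring
      · show _ = t + cntB (c :: tl) (tl.length + 1)
        rw [cntB_cons]; ring

lemma pre_getD (l : List Char) (j : Nat) (hj : j ≤ l.length) :
    ((l.foldl (fun (st : List Int × Int) c =>
      let t := if c == 'b' then st.2 + 1 else st.2
      (st.1 ++ [t], t)) ([(0 : Int)], 0)).1).getD j 0 = cntB l j := by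
  rw [pre_fold]
  cases j with
  | zero => simp [cntB]
  | succ i =>
      have hi : i < l.length := by omega
      show ((0 : Int) :: (List.range l.length).map (fun j => 0 + cntB l (j + 1))).getD (i + 1) 0 = _
      rw [List.getD_cons_succ]
      rw [List.getD_eq_getElem?_getD, List.getElem?_map, List.getElem?_range hi]
      simp

-- invariant of A's sliding-window loop: b_count always holds the current window value
lemma loopA (l : List Char) (k : Nat) : ∀ (m a : Nat) (acc : Int),
    k ≤ a → a + m ≤ l.length →
    (List.range' a m).foldl
      (fun (st : Int × Int) i =>
        let b := st.1
        let b := if l.getD (i - k) ' ' == 'b' then b - 1 else b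
        let b := if l.getD i ' ' == 'b' then b + 1 else b
        (b, min st.2 b)) (winB l k (a - k), acc)
    = (winB l k (a - k + m),
       (List.range' (a - k + 1) m).foldl (fun x j => min x (winB l k j)) acc) := by
  intro m
  induction m with
  | zero => intro a acc hk hm; simp
  | succ m ih =>
      intro a acc hk hm
      rw [List.range'_succ, List.range'_succ, List.foldl_cons, List.foldl_cons]
      have hstep : (let b := winB l k (a - k)
          let b := if l.getD (a - k) ' ' == 'b' then b - 1 else b
          if l.getD a ' ' == 'b' then b + 1 else b) = winB l k (a - k + 1) := by
        have h1 : winB l k (a - k + 1) = cntB l (a + 1) - cntB l (a - k + 1) := by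
          unfold winB; congr 2; omega
        have h2 : winB l k (a - k) = cntB l a - cntB l (a - k) := by
          unfold winB; congr 2; omega
        rw [cntB_succ l a (by omega), cntB_succ l (a - k) (by omega)] at h1
        simp only []
        rw [h2] at *
        split_ifs at h1 ⊢ <;> omega
      simp only [] at hstep ⊢
      rw [hstep]
      have := ih (a + 1) (min acc (winB l k (a - k + 1))) (by omega) (by omega)
      have he : a + 1 - k = a - k + 1 := by omega
      rw [he] at this
      rw [this]
      have h3 : a - k + 1 + m = a - k + (m + 1) := by omega
      rw [h3]

lemma foldl_congr' {α β : Type} (l : List β) (f g : α → β → α) (init : α)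
    (h : ∀ x ∈ l, ∀ acc, f acc x = g acc x) : l.foldl f init = l.foldl g init := by
  induction l generalizing init with
  | nil => rfl
  | cons x t ih =>
      simp only [List.foldl_cons, h x (by simp)]
      exact ih _ (fun y hy acc => h y (by simp [hy]) acc)

lemma solution_eq_alt (s : String) : solution s = solution_alt s := by
  unfold solution solution_alt
  simp only []
  set k := PySem.Str.count s "a" with hkdef
  set L := s.toList ++ s.toList with hL
  have hk : k ≤ s.toList.length := str_count_le s
  have hn : L.length = s.toList.length + s.toList.length := by simp [hL]
  have hkL : k ≤ L.length := by omega
  have hb : (((List.range k).countP (fun i => L.getD i ' ' == 'b') : Nat) : Int) = cntB L k :=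
    bcount_init L k hkL
  have hw0 : cntB L k = winB L k 0 := by simp [winB, cntB]
  have hA := loopA L k (L.length - k) k (winB L k 0) le_rfl (by omega)
  simp only [Nat.sub_self, Nat.zero_add] at hA
  rw [hb, hw0, hA]
  show List.foldl (fun x j => min x (winB L k j)) (winB L k 0) (List.range' 1 (L.length - k)) = _
  rw [pre_getD L k hkL, hw0]
  apply foldl_congr'
  intro j hj acc
  rw [List.mem_range'_1] at hj
  rw [pre_getD L (j + k) (by omega), pre_getD L j (by omega)]
  rfl

-- ===== VERDICT (by name: the statement is the Claim_ definition above) =====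
theorem solution_spec : Claim_equal_solution := by
  intro s _
  unfold Spec_solution
  exact solution_eq_alt s
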